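-- pv_equiv track=rewrite | github.com/akittendorf/WheelOfFortune | wheel-of-fortune.py | only_vowels
-- ===== SOURCE A (Python) =====
-- def only_vowels(guessed, chosen_word): # takes list of guessed and chosen_word, returns boolean
--     vowels = ['a', 'e', 'i', 'o', 'u']
--     remaining = [letter for letter in chosen_word if letter not in guessed]
--     all_vowels = True
--     for letter in remaining:
--         if letter in vowels:
--             continue
--         else:
--             all_vowels = False
--             break
--     return all_vowels
-- ===== SOURCE B (Python) =====
-- def only_vowels(guessed, chosen_word):
--     return set(chosen_word) - set(guessed) <= set('aeiou')
-- ===== Notes on version B (the rewrite author's own statement) =====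
-- stated objective: faster
-- what changed: Replaces the explicit filter-then-loop with an early-break flag by set algebra: the set of unguessed distinct letters is computed once (hash sets) and tested for subset containment in the vowel set, removing the inner list scan of guessed per letter.
import Mathlib
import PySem

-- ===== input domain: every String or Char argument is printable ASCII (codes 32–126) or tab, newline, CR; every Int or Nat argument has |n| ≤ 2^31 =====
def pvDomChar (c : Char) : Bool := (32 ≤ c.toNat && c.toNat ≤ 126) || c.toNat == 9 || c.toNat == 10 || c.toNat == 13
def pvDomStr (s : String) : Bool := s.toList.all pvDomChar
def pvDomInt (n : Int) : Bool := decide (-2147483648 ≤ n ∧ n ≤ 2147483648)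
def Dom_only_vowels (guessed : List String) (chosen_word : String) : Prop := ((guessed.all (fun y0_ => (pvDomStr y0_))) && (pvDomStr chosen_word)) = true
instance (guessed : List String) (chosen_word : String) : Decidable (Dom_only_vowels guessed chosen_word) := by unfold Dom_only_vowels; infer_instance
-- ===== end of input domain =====

-- B replaces A's filter-plus-early-break loop by set difference and subset containment (return value only; same result).
-- ===== PORT A =====
-- the 'for letter in remaining: … break' loop with the all_vowels flag
def ovLoop (vowels : List String) : List String → Bool
  | [] => true
  | letter :: rest => if vowels.contains letter then ovLoop vowels rest else false

def only_vowels (guessed : List String) (chosen_word : String) : Bool :=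
  let vowels : List String := ["a", "e", "i", "o", "u"]
  let remaining := (chosen_word.toList.map (fun c => String.singleton c)).filter
    (fun letter => !(guessed.contains letter))
  ovLoop vowels remaining

-- ===== PORT B =====
def only_vowels_alt (guessed : List String) (chosen_word : String) : Bool :=
  PySem.Set.issubset
    (PySem.Set.diff (PySem.Set.ofList (chosen_word.toList.map (fun c => String.singleton c)))
      (PySem.Set.ofList guessed))
    (PySem.Set.ofList ["a", "e", "i", "o", "u"])

-- ===== PRECONDITION & SPEC =====
def Spec_only_vowels (guessed : List String) (chosen_word : String) (out : Bool) : Prop := out = only_vowels_alt guessed chosen_word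
instance (guessed : List String) (chosen_word : String) (out : Bool) : Decidable (Spec_only_vowels guessed chosen_word out) := by unfold Spec_only_vowels; infer_instance

-- ===== CLAIM (what is proved, stated in full; the proofs are below) =====
def Claim_equal_only_vowels : Prop := ∀ (guessed : List String) (chosen_word : String), Dom_only_vowels guessed chosen_word → Spec_only_vowels guessed chosen_word (only_vowels guessed chosen_word)

-- ===== LEMMAS AND PROOFS =====

-- ===== VERDICT (by name: the statement is the Claim_ definition above) =====
theorem ovLoop_eq_all (vowels : List String) (l : List String) :
    ovLoop vowels l = l.all (fun x => vowels.contains x) := by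
  induction l with
  | nil => rfl
  | cons x xs ih =>
    simp only [ovLoop, List.all_cons]
    by_cases h : x ∈ vowels
    · simp [h, ih]
    · simp [h]

theorem only_vowels_spec : Claim_equal_only_vowels := by
  intro guessed chosen_word _
  unfold Spec_only_vowels only_vowels only_vowels_alt
  rw [ovLoop_eq_all]
  rw [Bool.eq_iff_iff]
  simp only [List.all_eq_true, List.mem_filter, PySem.Set.issubset_iff,
    PySem.Set.mem_diff, PySem.Set.mem_ofList, Bool.not_eq_eq_eq_not, Bool.not_true,
    List.contains_eq_mem, decide_eq_true_eq, decide_eq_false_iff_not]
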